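-- pv_equiv track=rewrite | github.com/siddharthsheth/cobordism_chrom_aberration | cobordism_chrom_aberration/genericcobordism.py | compute_in_out_len
-- ===== SOURCE A (Python) =====
-- def compute_in_out_len(step):
--     in_len, out_len = 0, 0
--     for element in step:
--         if element in {'I', 'T', 'C', 'D'}:
--             in_len += 1
--         elif element in {'P', 'W'}:
--             in_len += 2
--         elif element != 'B':
--             raise ValueError(f'Unknown cobordism: {element}.')
--         if element in {'I', 'T', 'P', 'B'}:
--             out_len += 1
--         elif element in {'C', 'W'}:
--             out_len += 2
--         elif element != 'D':
--             raise ValueError(f'Unknown cobordism: {element}.')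
--     return in_len, out_len
-- ===== SOURCE B (Python) =====
-- def compute_in_out_len(step):
--     counts = {}
--     for element in step:
--         counts[element] = counts.get(element, 0) + 1
--     for element in counts:
--         if element not in {'I', 'T', 'C', 'D', 'P', 'W', 'B'}:
--             raise ValueError(f'Unknown cobordism: {element}.')
--     in_len = (counts.get('I', 0) + counts.get('T', 0) + counts.get('C', 0)
--               + counts.get('D', 0) + 2 * (counts.get('P', 0) + counts.get('W', 0)))
--     out_len = (counts.get('I', 0) + counts.get('T', 0) + counts.get('P', 0)
--                + counts.get('B', 0) + 2 * (counts.get('C', 0) + counts.get('W', 0)))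
--     return in_len, out_len
-- ===== Notes on version B (the rewrite author's own statement) =====
-- stated objective: alternative
-- what changed: Replaces the per-element branch-and-accumulate loop with a frequency table built in one pass plus validation over distinct keys and two weighted sums over the seven symbols.
-- outside the precondition, e.g. on compute_in_out_len(['X']): A raises ValueError, B raises ValueError
import Mathlib
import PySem

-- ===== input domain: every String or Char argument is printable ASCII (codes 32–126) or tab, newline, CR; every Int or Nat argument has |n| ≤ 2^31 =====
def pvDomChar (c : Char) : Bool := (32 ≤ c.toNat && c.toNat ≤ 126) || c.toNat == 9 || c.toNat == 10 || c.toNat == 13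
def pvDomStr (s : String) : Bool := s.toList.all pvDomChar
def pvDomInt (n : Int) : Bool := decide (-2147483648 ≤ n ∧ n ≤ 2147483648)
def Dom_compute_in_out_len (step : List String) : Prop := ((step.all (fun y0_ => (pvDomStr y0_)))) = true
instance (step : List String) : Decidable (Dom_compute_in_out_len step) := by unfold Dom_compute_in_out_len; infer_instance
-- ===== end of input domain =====

-- B replaces A's per-element branch-and-accumulate loop with a frequency dict built in one
-- pass and two weighted sums over the seven symbols (alternative decomposition, same cost).

-- ===== PORT A =====
-- A's loop over step keeping (in_len, out_len); the raise branches are unreachable under Pre_.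
def compute_in_out_len (step : List String) : Int × Int :=
  step.foldl
    (fun (p : Int × Int) element =>
      let in_len :=
        if element = "I" ∨ element = "T" ∨ element = "C" ∨ element = "D" then p.1 + 1
        else if element = "P" ∨ element = "W" then p.1 + 2
        else p.1  -- element = "B" here under Pre_; otherwise Python raises ValueError
      let out_len :=
        if element = "I" ∨ element = "T" ∨ element = "P" ∨ element = "B" then p.2 + 1
        else if element = "C" ∨ element = "W" then p.2 + 2
        else p.2  -- element = "D" here under Pre_; otherwise Python raises ValueError
      (in_len, out_len))
    (0, 0)

-- ===== PORT B =====
-- counts[element] = counts.get(element, 0) + 1 over step, then weighted sums of counts.get(s, 0).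
def compute_in_out_len_alt (step : List String) : Int × Int :=
  let counts : PySem.Dict String Int :=
    step.foldl (fun d x => d.insert x (d.getD x 0 + 1)) PySem.Dict.empty
  let g : String → Int := fun s => counts.getD s 0
  (g "I" + g "T" + g "C" + g "D" + 2 * (g "P" + g "W"),
   g "I" + g "T" + g "P" + g "B" + 2 * (g "C" + g "W"))

-- ===== PRECONDITION & SPEC =====
-- Pre_ excludes inputs containing a symbol outside {I,T,C,D,P,W,B}: there Python A raises ValueError.
def Pre_compute_in_out_len (step : List String) : Prop :=
  ∀ e ∈ step, e = "I" ∨ e = "T" ∨ e = "C" ∨ e = "D" ∨ e = "P" ∨ e = "W" ∨ e = "B"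
instance (step : List String) : Decidable (Pre_compute_in_out_len step) := by
  unfold Pre_compute_in_out_len; infer_instance
def pvWitness_compute_in_out_len : List String := ["I", "W", "B", "D", "I"]

def Spec_compute_in_out_len (step : List String) (out : Int × Int) : Prop := out = compute_in_out_len_alt step
instance (step : List String) (out : Int × Int) : Decidable (Spec_compute_in_out_len step out) := by unfold Spec_compute_in_out_len; infer_instance

-- ===== CLAIM (what is proved, stated in full; the proofs are below) =====
def Claim_equal_compute_in_out_len : Prop := ∀ (step : List String), Dom_compute_in_out_len step → Pre_compute_in_out_len step → Spec_compute_in_out_len step (compute_in_out_len step)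

-- ===== LEMMAS AND PROOFS =====

-- count-based values of the two accumulators
def pvInSum (step : List String) : Int :=
  (step.count "I" : Int) + step.count "T" + step.count "C" + step.count "D"
    + 2 * ((step.count "P" : Int) + step.count "W")
def pvOutSum (step : List String) : Int :=
  (step.count "I" : Int) + step.count "T" + step.count "P" + step.count "B"
    + 2 * ((step.count "C" : Int) + step.count "W")

theorem pv_loopA (step : List String)
    (h : Pre_compute_in_out_len step) (a b : Int) :
    step.foldl
      (fun (p : Int × Int) element =>
        let in_len :=
          if element = "I" ∨ element = "T" ∨ element = "C" ∨ element = "D" then p.1 + 1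
          else if element = "P" ∨ element = "W" then p.1 + 2
          else p.1
        let out_len :=
          if element = "I" ∨ element = "T" ∨ element = "P" ∨ element = "B" then p.2 + 1
          else if element = "C" ∨ element = "W" then p.2 + 2
          else p.2
        (in_len, out_len)) (a, b)
      = (a + pvInSum step, b + pvOutSum step) := by
  induction step generalizing a b with
  | nil => simp [pvInSum, pvOutSum]
  | cons e rest ih =>
    have he := h e (List.mem_cons_self ..)
    have hrest : Pre_compute_in_out_len rest := fun x hx => h x (List.mem_cons_of_mem _ hx)
    rcases he with h1 | h1 | h1 | h1 | h1 | h1 | h1 <;>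
      subst h1 <;>
      simp only [List.foldl_cons, ih hrest, pvInSum, pvOutSum, List.count_cons,
        Prod.mk.injEq, String.reduceEq, or_self, or_false, or_true,
        if_true, if_false, beq_iff_eq] <;>
      norm_num <;> omega

theorem pvA_eq (step : List String) (h : Pre_compute_in_out_len step) :
    compute_in_out_len step = (pvInSum step, pvOutSum step) := by
  unfold compute_in_out_len
  rw [pv_loopA step h 0 0]
  simp

theorem pvB_eq (step : List String) :
    compute_in_out_len_alt step = (pvInSum step, pvOutSum step) := by
  unfold compute_in_out_len_alt pvInSum pvOutSum
  simp [PySem.Dict.getD_foldl_insert_add_one, PySem.Dict.getD_empty]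

-- ===== VERDICT (by name: the statement is the Claim_ definition above) =====
theorem compute_in_out_len_spec : Claim_equal_compute_in_out_len := by
  intro step _ hpre
  unfold Spec_compute_in_out_len
  rw [pvA_eq step hpre, pvB_eq step]
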